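-- pv_equiv track=rewrite | github.com/bliink123/AICoach | backend/app.py | get_run_days_simple
-- ===== SOURCE A (Python) =====
-- def get_run_days_simple(week_days, run_days, long_run_day):
--     """Simple method to get a set of run days, ensuring long_run_day is included."""
--     selected_run_days = []
--     if long_run_day not in week_days:
--         raise ValueError("long_run_day must be in week_days")
--     selected_run_days.append(long_run_day)
--     for day in week_days:
--         if day != long_run_day and len(selected_run_days) < run_days:
--             selected_run_days.append(day)
--     return sorted(selected_run_days, key=lambda d: week_days.index(d))
-- ===== SOURCE B (Python) =====
-- def get_run_days_simple(week_days, run_days, long_run_day):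
--     """Single pass in week order: emit long_run_day at its first occurrence,
--     and up to run_days - 1 other days; no final sort needed."""
--     if long_run_day not in week_days:
--         raise ValueError("long_run_day must be in week_days")
--     result = []
--     emitted_long = False
--     others = 0
--     for day in week_days:
--         if day == long_run_day:
--             if not emitted_long:
--                 result.append(day)
--                 emitted_long = True
--         elif others < run_days - 1:
--             result.append(day)
--             others += 1
--     return result
-- ===== Notes on version B (the rewrite author's own statement) =====
-- stated objective: alternative
-- what changed: Replaces A's select-then-sort (collect long day plus extras, then sorted with a week_days.index key that rescans the list per element) with a single counting pass over week_days in week order that needs no sort and no index scans.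
-- outside the precondition, e.g. on get_run_days_simple(['A', 'B', 'A', 'C'], 4, 'C'): A returns ['A', 'A', 'B', 'C'], B returns ['A', 'B', 'A', 'C']
import Mathlib
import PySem

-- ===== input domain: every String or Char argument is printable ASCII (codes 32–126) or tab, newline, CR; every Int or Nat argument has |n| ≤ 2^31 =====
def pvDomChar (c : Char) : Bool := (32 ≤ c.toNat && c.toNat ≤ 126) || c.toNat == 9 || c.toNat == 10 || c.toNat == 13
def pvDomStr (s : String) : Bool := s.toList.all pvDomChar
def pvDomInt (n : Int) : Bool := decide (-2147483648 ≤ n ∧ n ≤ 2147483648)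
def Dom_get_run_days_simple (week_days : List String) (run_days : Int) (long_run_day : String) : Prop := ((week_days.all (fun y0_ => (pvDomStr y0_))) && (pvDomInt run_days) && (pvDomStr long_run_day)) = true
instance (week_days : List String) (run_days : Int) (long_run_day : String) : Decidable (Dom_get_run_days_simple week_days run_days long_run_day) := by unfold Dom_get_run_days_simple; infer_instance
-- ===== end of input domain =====

-- B replaces A's select-then-sort-by-index with a single counting pass in week order (no sort, no index scans).
-- A's raise (long_run_day ∉ week_days) is excluded by Pre_; the equivalence is about the return value only.

-- ===== PORT A =====
-- the append loop: append day while day != long_run_day and len(selected) < run_days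
def get_run_days_simple (week_days : List String) (run_days : Int) (long_run_day : String) : List String :=
  -- Python raises ValueError when long_run_day ∉ week_days; Pre_ excludes that, so the port
  -- computes the non-raising path.  week_days.index(d) is ported as (index? …).getD 0, exact
  -- because every selected day is a member of week_days.
  let selected :=
    week_days.foldl
      (fun acc day =>
        if day ≠ long_run_day ∧ (acc.length : Int) < run_days then acc ++ [day] else acc)
      [long_run_day]
  PySem.List.sorted selected (fun d => ((PySem.List.index? week_days d).getD 0 : Nat)) false

-- ===== PORT B =====
-- state = (result, emitted_long, others); one pass over week_days
def get_run_days_simple_alt (week_days : List String) (run_days : Int) (long_run_day : String) : List String :=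
  (week_days.foldl
    (fun (st : List String × Bool × Int) day =>
      if day = long_run_day then
        if st.2.1 then st else (st.1 ++ [day], true, st.2.2)
      else if st.2.2 < run_days - 1 then (st.1 ++ [day], st.2.1, st.2.2 + 1)
      else st)
    ([], false, 0)).1

-- ===== PRECONDITION & SPEC =====
-- Pre_ excludes inputs where A raises ValueError (long_run_day not in week_days), and week_days
-- containing a duplicated non-long day, on which A's stable sort by first index groups the
-- repeated day's occurrences together accidentally while B keeps each occurrence at its own position.
def Pre_get_run_days_simple (week_days : List String) (run_days : Int) (long_run_day : String) : Prop :=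
  long_run_day ∈ week_days ∧ (week_days.filter (fun d => d ≠ long_run_day)).Nodup
instance (week_days : List String) (run_days : Int) (long_run_day : String) : Decidable (Pre_get_run_days_simple week_days run_days long_run_day) := by unfold Pre_get_run_days_simple; infer_instance
def pvWitness_get_run_days_simple : List String × Int × String := (["Mon", "Wed", "Sat"], 3, "Sat")

def Spec_get_run_days_simple (week_days : List String) (run_days : Int) (long_run_day : String) (out : List String) : Prop := out = get_run_days_simple_alt week_days run_days long_run_day
instance (week_days : List String) (run_days : Int) (long_run_day : String) (out : List String) : Decidable (Spec_get_run_days_simple week_days run_days long_run_day out) := by unfold Spec_get_run_days_simple; infer_instance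

-- ===== CLAIM (what is proved, stated in full; the proofs are below) =====
def Claim_equal_get_run_days_simple : Prop := ∀ (week_days : List String) (run_days : Int) (long_run_day : String), Dom_get_run_days_simple week_days run_days long_run_day → Pre_get_run_days_simple week_days run_days long_run_day → Spec_get_run_days_simple week_days run_days long_run_day (get_run_days_simple week_days run_days long_run_day)

-- ===== LEMMAS AND PROOFS =====

-- recursive specification of B's fold
def bSpec (run_days : Int) (long_run_day : String) : List String → Bool → Int → List String
  | [], _, _ => []
  | d :: t, e, o =>
    if d = long_run_day then
      (if e then bSpec run_days long_run_day t e o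
       else d :: bSpec run_days long_run_day t true o)
    else if o < run_days - 1 then d :: bSpec run_days long_run_day t e (o + 1)
    else bSpec run_days long_run_day t e o

theorem bSpec_foldl (run_days : Int) (long_run_day : String) :
    ∀ (l : List String) (res : List String) (e : Bool) (o : Int),
      (l.foldl
        (fun (st : List String × Bool × Int) day =>
          if day = long_run_day then
            if st.2.1 then st else (st.1 ++ [day], true, st.2.2)
          else if st.2.2 < run_days - 1 then (st.1 ++ [day], st.2.1, st.2.2 + 1)
          else st)
        (res, e, o)).1 = res ++ bSpec run_days long_run_day l e o := by
  intro l
  induction l with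
  | nil => intro res e o; simp [bSpec]
  | cons d t ih =>
    intro res e o
    by_cases hd : d = long_run_day
    · by_cases he : e = true
      · simp [List.foldl_cons, hd, he, bSpec, ih]
      · simp at he
        simp [List.foldl_cons, hd, he, bSpec, ih]
    · by_cases ho : o < run_days - 1
      · simp [List.foldl_cons, hd, ho, bSpec, ih]
      · simp [List.foldl_cons, hd, ho, bSpec, ih]

theorem alt_eq_bSpec (week_days : List String) (run_days : Int) (long_run_day : String) :
    get_run_days_simple_alt week_days run_days long_run_day
      = bSpec run_days long_run_day week_days false 0 := by
  unfold get_run_days_simple_alt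
  simpa using bSpec_foldl run_days long_run_day week_days [] false 0

-- A's loop builds long_run_day :: first (run_days-1) non-long days
theorem aLoop_take (run_days : Int) (long_run_day : String) :
    ∀ (l : List String) (acc : List String),
      l.foldl
        (fun acc day =>
          if day ≠ long_run_day ∧ (acc.length : Int) < run_days then acc ++ [day] else acc)
        acc
      = acc ++ (l.filter (fun d => d ≠ long_run_day)).take ((run_days - acc.length).toNat) := by
  intro l
  induction l with
  | nil => intro acc; simp
  | cons d t ih =>
    intro acc
    by_cases hd : d = long_run_day
    · simp [List.foldl_cons, hd, ih]
    · by_cases hl : (acc.length : Int) < run_days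
      · rw [List.foldl_cons]
        simp only [hd, hl, ne_eq, not_false_eq_true, true_and, if_pos]
        rw [ih]
        have h1 : (run_days - acc.length).toNat = (run_days - (acc ++ [d]).length).toNat + 1 := by
          simp; omega
        simp [hd, h1, List.take_succ_cons]
      · rw [List.foldl_cons]
        simp only [hd, hl, ne_eq, not_false_eq_true, and_false, if_neg]
        rw [ih]
        have h0 : (run_days - acc.length).toNat = 0 := by omega
        simp [hd, h0]

-- B's output restricted to non-long days is a take of the non-long days
theorem bSpec_filter (run_days : Int) (long_run_day : String) :
    ∀ (l : List String) (e : Bool) (o : Int),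
      (bSpec run_days long_run_day l e o).filter (fun d => d ≠ long_run_day)
        = (l.filter (fun d => d ≠ long_run_day)).take ((run_days - 1 - o).toNat) := by
  intro l
  induction l with
  | nil => intro e o; simp [bSpec]
  | cons d t ih =>
    intro e o
    simp only [ne_eq, decide_not] at ih ⊢
    by_cases hd : d = long_run_day
    · cases e <;> simp [bSpec, hd, ih]
    · by_cases ho : o < run_days - 1
      · have h1 : (run_days - 1 - o).toNat = (run_days - 1 - (o + 1)).toNat + 1 := by omega
        simp [bSpec, hd, ho, ih, h1, List.take_succ_cons]
      · have h0 : (run_days - 1 - o).toNat = 0 := by omega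
        simp [bSpec, hd, ho, ih, h0]

-- long_run_day occurs in B's output iff it has not been emitted and occurs in the input
theorem bSpec_mem_long (run_days : Int) (long_run_day : String) :
    ∀ (l : List String) (e : Bool) (o : Int),
      long_run_day ∈ bSpec run_days long_run_day l e o ↔ (e = false ∧ long_run_day ∈ l) := by
  intro l
  induction l with
  | nil => intro e o; simp [bSpec]
  | cons d t ih =>
    intro e o
    by_cases hd : d = long_run_day
    · cases e <;> simp [bSpec, hd, ih]
    · by_cases ho : o < run_days - 1
      · simp [bSpec, hd, ho, ih, Ne.symm hd]
      · simp [bSpec, hd, ho, ih, Ne.symm hd]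

-- long_run_day appears at most once in B's output
theorem bSpec_count_long (run_days : Int) (long_run_day : String) :
    ∀ (l : List String) (e : Bool) (o : Int),
      (bSpec run_days long_run_day l e o).count long_run_day ≤ 1 := by
  intro l
  induction l with
  | nil => intro e o; simp [bSpec]
  | cons d t ih =>
    intro e o
    by_cases hd : d = long_run_day
    · cases e with
      | true => simp [bSpec, hd]; exact ih true o
      | false =>
        have hnot : long_run_day ∉ bSpec run_days long_run_day t true o := by
          rw [bSpec_mem_long]; simp
        simp [bSpec, hd, List.count_cons_self, List.count_eq_zero_of_not_mem hnot]
    · by_cases ho : o < run_days - 1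
      · simpa [bSpec, hd, ho, List.count_cons_of_ne (Ne.symm hd)] using ih e (o + 1)
      · simpa [bSpec, hd, ho] using ih e o

-- if the same value occurred at a position and nowhere else among the non-long days,
-- the first index of each emitted day is its emission position: B's output has strictly
-- increasing first indices in m = week_days
theorem bSpec_pairwise_key (m : List String) (run_days : Int) (long_run_day : String)
    (hf : (m.filter (fun d => d ≠ long_run_day)).Nodup) :
    ∀ (l p : List String) (e : Bool) (o : Int), m = p ++ l → (e = true ↔ long_run_day ∈ p) →
      (bSpec run_days long_run_day l e o).Pairwise
        (fun a b => ((PySem.List.index? m a).getD 0 : Nat) < (PySem.List.index? m b).getD 0)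
      ∧ ∀ d ∈ bSpec run_days long_run_day l e o,
          p.length ≤ ((PySem.List.index? m d).getD 0 : Nat) := by
  intro l
  induction l with
  | nil => intro p e o hm he; simp [bSpec]
  | cons d t ih =>
    intro p e o hm he
    have hm' : m = (p ++ [d]) ++ t := by simp [hm]
    have hkey : d ∉ p → ((PySem.List.index? m d).getD 0 : Nat) = p.length := by
      intro hdp
      have h : PySem.List.index? m d = some p.length :=
        (PySem.List.index?_eq_some_iff _ _ _).mpr ⟨p, t, hm, rfl, hdp⟩
      rw [h]; rfl
    by_cases hd : d = long_run_day
    · cases e with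
      | true =>
        have he' : (true = true) ↔ long_run_day ∈ p ++ [d] := by
          simp [he.mp rfl]
        obtain ⟨hpw, hge⟩ := ih (p ++ [d]) true o hm' he'
        rw [show bSpec run_days long_run_day (d :: t) true o
              = bSpec run_days long_run_day t true o from by simp [bSpec, hd]]
        refine ⟨hpw, ?_⟩
        intro x hx
        have := hge x hx
        simp only [List.length_append, List.length_cons, List.length_nil] at this
        omega
      | false =>
        have hdp : d ∉ p := by rw [hd]; intro hc; exact absurd (he.mpr hc) (by simp)
        have he' : (true = true) ↔ long_run_day ∈ p ++ [d] := by simp [hd]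
        obtain ⟨hpw, hge⟩ := ih (p ++ [d]) true o hm' he'
        rw [show bSpec run_days long_run_day (d :: t) false o
              = d :: bSpec run_days long_run_day t true o from by simp [bSpec, hd]]
        constructor
        · rw [List.pairwise_cons]
          refine ⟨fun b hb => ?_, hpw⟩
          have := hge b hb
          rw [hkey hdp]
          simp only [List.length_append, List.length_cons, List.length_nil] at this
          omega
        · intro x hx
          rcases List.mem_cons.mp hx with rfl | hx
          · rw [hkey hdp]
          · have := hge x hx
            simp only [List.length_append, List.length_cons, List.length_nil] at this
            omega
    · have hdp : d ∉ p := by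
        intro hc
        rw [hm, List.filter_append] at hf
        obtain ⟨-, -, hdisj⟩ := List.nodup_append.mp hf
        exact hdisj d (List.mem_filter.mpr ⟨hc, by simp [hd]⟩) d
          (by simp [hd]) rfl
      have he' : (e = true) ↔ long_run_day ∈ p ++ [d] := by
        simp [he, Ne.symm hd]
      by_cases ho : o < run_days - 1
      · obtain ⟨hpw, hge⟩ := ih (p ++ [d]) e (o + 1) hm' he'
        rw [show bSpec run_days long_run_day (d :: t) e o
              = d :: bSpec run_days long_run_day t e (o + 1) by simp [bSpec, hd, ho]]
        constructor
        · rw [List.pairwise_cons]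
          refine ⟨fun b hb => ?_, hpw⟩
          have := hge b hb
          rw [hkey hdp]
          simp only [List.length_append, List.length_cons, List.length_nil] at this
          omega
        · intro x hx
          rcases List.mem_cons.mp hx with rfl | hx
          · rw [hkey hdp]
          · have := hge x hx
            simp only [List.length_append, List.length_cons, List.length_nil] at this
            omega
      · obtain ⟨hpw, hge⟩ := ih (p ++ [d]) e o hm' he'
        rw [show bSpec run_days long_run_day (d :: t) e o
              = bSpec run_days long_run_day t e o by simp [bSpec, hd, ho]]
        refine ⟨hpw, fun x hx => ?_⟩
        have := hge x hx
        simp only [List.length_append, List.length_cons, List.length_nil] at this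
        omega

-- ===== VERDICT (by name: the statement is the Claim_ definition above) =====
theorem get_run_days_simple_spec : Claim_equal_get_run_days_simple := by
  intro week_days run_days long_run_day _ hpre
  obtain ⟨hmem, hfnodup⟩ := hpre
  unfold Spec_get_run_days_simple
  rw [alt_eq_bSpec]
  unfold get_run_days_simple
  rw [aLoop_take]
  set T := (week_days.filter (fun d => d ≠ long_run_day)).take ((run_days - (1:Nat)).toNat) with hT
  set Bout := bSpec run_days long_run_day week_days false 0 with hB
  have hlongT : long_run_day ∉ T := fun hc =>
    absurd (List.of_mem_filter (List.mem_of_mem_take hc)) (by simp)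
  have hperm : Bout.Perm (long_run_day :: T) := by
    rw [List.perm_iff_count]
    intro v
    by_cases hv : v = long_run_day
    · subst hv
      have h1 : 0 < Bout.count v := List.count_pos_iff.mpr
        ((bSpec_mem_long run_days v week_days false 0).mpr ⟨rfl, hmem⟩)
      have h2 : Bout.count v ≤ 1 := bSpec_count_long run_days v week_days false 0
      have h3 : T.count v = 0 := List.count_eq_zero_of_not_mem hlongT
      rw [List.count_cons_self, h3]
      omega
    · have h1 : Bout.count v = (Bout.filter (fun d => d ≠ long_run_day)).count v :=
        (List.count_filter (by simp [hv])).symm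
      rw [h1, hB, bSpec_filter run_days long_run_day week_days false 0,
        List.count_cons_of_ne (fun hc => hv hc.symm)]
      simp [hT]
  have hpair : Bout.Pairwise
      (fun a b => ((PySem.List.index? week_days a).getD 0 : Nat) < (PySem.List.index? week_days b).getD 0) :=
    (bSpec_pairwise_key week_days run_days long_run_day hfnodup week_days [] false 0
      (by simp) (by simp)).1
  have := PySem.List.sorted_eq_of_perm_of_pairwise_lt
      (xs := long_run_day :: T)
      (key := fun d => ((PySem.List.index? week_days d).getD 0 : Nat))
      (ys := Bout) hperm hpair
  simpa [hT] using this
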